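-- pv_equiv track=rewrite | github.com/palaj1/codepath-tip-102 | unit_2/s2/advanced/v1/gallery_wall_p3.py | organize_exhibition
-- ===== SOURCE A (Python) =====
-- from collections import Counter
--
-- def organize_exhibition(collection: list):
--     freq_dict = Counter(collection)
--     num_sublists = max(freq_dict.values())
--
--     if num_sublists == 1:
--         return [collection]
--
--     sublists = [[] for _ in range(num_sublists)]
--
--     for s in sublists:
--         for c in collection:
--             if freq_dict[c] >= 1 and c not in s:
--                 s.append(c)
--                 freq_dict[c] -= 1
--
--     return sublists
-- ===== SOURCE B (Python) =====
-- def organize_exhibition(collection: list):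
--     counts = {}
--     order = []
--     for c in collection:
--         if c in counts:
--             counts[c] += 1
--         else:
--             counts[c] = 1
--             order.append(c)
--     num_sublists = max(counts.values())
--     return [[c for c in order if counts[c] > i] for i in range(num_sublists)]
-- ===== Notes on version B (the rewrite author's own statement) =====
-- stated objective: faster
-- what changed: B replaces A's max-frequency-many full passes over the collection (each with a linear 'c not in s' membership scan) by one counting pass that records counts and first-appearance order, emitting sublist i as the ordered distinct elements whose count exceeds i.
import Mathlib
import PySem

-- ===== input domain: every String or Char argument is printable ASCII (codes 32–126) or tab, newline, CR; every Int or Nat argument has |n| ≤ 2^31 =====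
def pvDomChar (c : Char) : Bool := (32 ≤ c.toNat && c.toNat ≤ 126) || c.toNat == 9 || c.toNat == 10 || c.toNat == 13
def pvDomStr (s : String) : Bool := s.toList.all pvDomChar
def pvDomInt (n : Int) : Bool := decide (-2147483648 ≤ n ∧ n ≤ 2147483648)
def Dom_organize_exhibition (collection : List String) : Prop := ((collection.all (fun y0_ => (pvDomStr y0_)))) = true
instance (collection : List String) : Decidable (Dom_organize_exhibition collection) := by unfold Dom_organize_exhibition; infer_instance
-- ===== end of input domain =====

-- B replaces A's max-frequency-many full passes (each with a linear membership scan) by a single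
-- counting pass plus one filter per output sublist; equivalence is proved for nonempty input.

-- ===== PORT A =====
def organize_exhibition (collection : List String) : List (List String) :=
  let freq_dict := PySem.Dict.counter collection
  match PySem.List.max? freq_dict.values (fun v => v) with
  | none => []      -- Python: max() of an empty sequence raises ValueError; excluded by Pre_
  | some num_sublists =>
    if num_sublists = 1 then
      [collection]
    else
      let sublists : List (List String) := (PySem.List.pyRange 0 num_sublists 1).map (fun _ => [])
      let r := sublists.foldl
        (fun (st : List (List String) × PySem.Dict String Int) s =>
          let p := collection.foldl
            (fun (p : List String × PySem.Dict String Int) c =>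
              if 1 ≤ p.2.getD c 0 ∧ c ∉ p.1 then
                (p.1 ++ [c], p.2.insert c (p.2.getD c 0 - 1))
              else p)
            (s, st.2)
          (st.1 ++ [p.1], p.2))
        ([], freq_dict)
      r.1

-- ===== PORT B =====
def organize_exhibition_alt (collection : List String) : List (List String) :=
  let st := collection.foldl
    (fun (st : PySem.Dict String Int × List String) c =>
      if st.1.contains c then
        (st.1.insert c (st.1.getD c 0 + 1), st.2)
      else
        (st.1.insert c 1, st.2 ++ [c]))
    (PySem.Dict.empty, [])
  match PySem.List.max? st.1.values (fun v => v) with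
  | none => []      -- Python: max() of an empty sequence raises ValueError; excluded by Pre_
  | some num_sublists =>
    (PySem.List.pyRange 0 num_sublists 1).map
      (fun i => st.2.filter (fun c => decide (i < st.1.getD c 0)))

-- ===== PRECONDITION & SPEC =====
-- Pre_ excludes only the empty list, on which Python's max() raises ValueError (in A and in B alike).
def Pre_organize_exhibition (collection : List String) : Prop := collection ≠ []
instance (collection : List String) : Decidable (Pre_organize_exhibition collection) := by unfold Pre_organize_exhibition; infer_instance
def pvWitness_organize_exhibition : List String := ["a"]

def Spec_organize_exhibition (collection : List String) (out : List (List String)) : Prop := out = organize_exhibition_alt collection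
instance (collection : List String) (out : List (List String)) : Decidable (Spec_organize_exhibition collection out) := by unfold Spec_organize_exhibition; infer_instance

-- ===== CLAIM (what is proved, stated in full; the proofs are below) =====
def Claim_equal_organize_exhibition : Prop := ∀ (collection : List String), Dom_organize_exhibition collection → Pre_organize_exhibition collection → Spec_organize_exhibition collection (organize_exhibition collection)

-- ===== LEMMAS AND PROOFS =====

-- first occurrences in `t` of elements not in the seen list `s`, in order
def nf (s : List String) : List String → List String
  | [] => []
  | c :: t => if c ∈ s then nf s t else c :: nf (s ++ [c]) t

lemma mem_nf_not_mem : ∀ (t s : List String) {x : String}, x ∈ nf s t → x ∉ s := by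
  intro t
  induction t with
  | nil => intro s x hx; simp [nf] at hx
  | cons c t ih =>
    intro s x hx
    by_cases hc : c ∈ s
    · exact ih s (by simpa [nf, hc] using hx)
    · rcases (by simpa [nf, hc] using hx : x = c ∨ x ∈ nf (s ++ [c]) t) with h | h
      · simpa [h] using hc
      · have := ih (s ++ [c]) h
        intro hxs; exact this (by simp [hxs])

lemma nf_congr : ∀ (t s s' : List String), (∀ x, x ∈ s ↔ x ∈ s') → nf s t = nf s' t := by
  intro t
  induction t with
  | nil => intro s s' _; simp [nf]
  | cons c t ih =>
    intro s s' h
    by_cases hc : c ∈ s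
    · simp [nf, hc, (h c).mp hc, ih s s' h]
    · have hc' : c ∉ s' := fun hx => hc ((h c).mpr hx)
      simp only [nf, if_neg hc, if_neg hc']
      exact congrArg (c :: ·) (ih _ _ (by intro x; simp [h x]))

lemma nf_append_singleton : ∀ (t s : List String) (c : String),
    nf (s ++ [c]) t = (nf s t).filter (fun x => decide (x ≠ c)) := by
  intro t
  induction t with
  | nil => intro s c; simp [nf]
  | cons x t ih =>
    intro s c
    by_cases hxs : x ∈ s
    · simp [nf, hxs, ih s c]
    · by_cases hxc : x = c
      · subst hxc
        have h1 : nf (s ++ [x]) (x :: t) = nf (s ++ [x]) t := by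
          simp [nf]
        have h2 : nf s (x :: t) = x :: nf (s ++ [x]) t := by
          simp [nf, hxs]
        rw [h1, h2, List.filter_cons_of_neg (by simp)]
        symm
        rw [List.filter_eq_self]
        intro a ha
        have := mem_nf_not_mem t (s ++ [x]) ha
        simp at this
        simp [this.2]
      · have : x ∉ s ++ [c] := by simp [hxs, hxc]
        simp only [nf, if_neg hxs, if_neg this]
        rw [List.filter_cons_of_pos (by simp [hxc])]
        refine congrArg (x :: ·) ?_
        rw [← ih (s ++ [x]) c]
        exact nf_congr t _ _ (by intro y; simp; tauto)

lemma foldl_set_add_eq_nf : ∀ (t s : List String),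
    t.foldl PySem.Set.add s = s ++ nf s t := by
  intro t
  induction t with
  | nil => intro s; simp [nf]
  | cons c t ih =>
    intro s
    by_cases hc : c ∈ s
    · simp [List.foldl_cons, PySem.Set.add, nf, hc, ih s]
    · simp only [List.foldl_cons, PySem.Set.add, nf]
      rw [if_neg (by simpa using hc), if_neg hc, ih (s ++ [c])]
      simp

lemma nf_eq_self_of_nodup : ∀ (t s : List String), t.Nodup → (∀ x ∈ t, x ∉ s) → nf s t = t := by
  intro t
  induction t with
  | nil => intro s _ _; simp [nf]
  | cons c t ih =>
    intro s hnd h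
    have hc : c ∉ s := h c (by simp)
    simp only [nf, if_neg hc]
    refine congrArg (c :: ·) (ih (s ++ [c]) (List.Nodup.of_cons hnd) ?_)
    intro x hx
    simp only [List.mem_append, List.mem_singleton]
    rintro (h1 | h2)
    · exact h x (by simp [hx]) h1
    · exact (List.nodup_cons.mp hnd).1 (h2 ▸ hx)

-- the inner pass of A: starting from seen list s and a dict valued g ≥ 0, one pass over l
-- appends the fresh first occurrences with value ≥ 1 and decrements exactly those
lemma innerA : ∀ (l : List String) (g : String → Int) (s : List String) (d : PySem.Dict String Int),
    (∀ c, d.getD c 0 = g c) → (∀ c, 0 ≤ g c) →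
    (l.foldl
      (fun (p : List String × PySem.Dict String Int) c =>
        if 1 ≤ p.2.getD c 0 ∧ c ∉ p.1 then
          (p.1 ++ [c], p.2.insert c (p.2.getD c 0 - 1))
        else p)
      (s, d)).1 = s ++ (nf s l).filter (fun c => decide (1 ≤ g c)) ∧
    ∀ x, (l.foldl
      (fun (p : List String × PySem.Dict String Int) c =>
        if 1 ≤ p.2.getD c 0 ∧ c ∉ p.1 then
          (p.1 ++ [c], p.2.insert c (p.2.getD c 0 - 1))
        else p)
      (s, d)).2.getD x 0 = if x ∈ l ∧ x ∉ s ∧ 1 ≤ g x then g x - 1 else g x := by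
  intro l
  induction l with
  | nil =>
    intro g s d hd _
    refine ⟨by simp [nf], by intro x; simp [hd x]⟩
  | cons c l ih =>
    intro g s d hd hg
    by_cases hc : 1 ≤ d.getD c 0 ∧ c ∉ s
    · have hgc : 1 ≤ g c := by rw [← hd c]; exact hc.1
      have hcs : c ∉ s := hc.2
      simp only [List.foldl_cons]
      rw [if_pos hc]
      set g' : String → Int := fun x => if x = c then g c - 1 else g x with hg'
      have hd' : ∀ x, (d.insert c (d.getD c 0 - 1)).getD x 0 = g' x := by
        intro x
        rw [PySem.Dict.getD_insert]
        by_cases hx : x = c <;> simp [hg', hx, hd]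
      have hg'nn : ∀ x, 0 ≤ g' x := by
        intro x
        by_cases hx : x = c
        · simp only [hg', hx, if_pos rfl]; omega
        · simp only [hg', if_neg hx]; exact hg x
      obtain ⟨ih1, ih2⟩ := ih g' (s ++ [c]) _ hd' hg'nn
      constructor
      · rw [ih1]
        rw [show nf s (c :: l) = c :: nf (s ++ [c]) l by simp [nf, hcs]]
        rw [List.filter_cons_of_pos (by simp [hgc])]
        simp only [List.append_assoc, List.cons_append]
        refine congrArg _ (congrArg _ ?_)
        apply List.filter_congr
        intro x hx
        have hxc : x ≠ c := by
          have := mem_nf_not_mem l (s ++ [c]) hx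
          simp at this
          exact fun h => this.2 h
        simp [hg', hxc]
      · intro x
        rw [ih2 x]
        by_cases hx : x = c
        · subst hx
          rw [if_neg (by simp), if_pos ⟨by simp, hcs, hgc⟩]
          simp [hg']
        · have hgx : g' x = g x := by simp [hg', hx]
          rw [hgx]
          simp only [List.mem_cons, List.mem_append]
          split_ifs <;> first | rfl | tauto
    · simp only [List.foldl_cons]
      rw [if_neg hc]
      obtain ⟨ih1, ih2⟩ := ih g s d hd hg
      have hcase : c ∈ s ∨ g c ≤ 0 := by
        rcases not_and_or.mp hc with h | h
        · right; rw [← hd c]; omega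
        · left; exact not_not.mp h
      constructor
      · rw [ih1]
        congr 1
        by_cases hcs : c ∈ s
        · simp [nf, hcs]
        · have hgc : ¬ 1 ≤ g c := by
            rcases hcase with h | h
            · exact absurd h hcs
            · omega
          rw [show nf s (c :: l) = c :: nf (s ++ [c]) l by simp [nf, hcs]]
          rw [List.filter_cons_of_neg (by simp [hgc])]
          rw [nf_append_singleton, List.filter_filter]
          apply List.filter_congr
          intro x hx
          by_cases hxc : x = c <;> simp [hxc, hgc]
      · intro x
        rw [ih2 x]
        by_cases hx : x = c
        · subst hx
          have hfalse : ¬ (x ∉ s ∧ 1 ≤ g x) := by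
            rintro ⟨h1, h2⟩
            rcases hcase with h | h
            · exact h1 h
            · omega
          rw [if_neg (fun h => hfalse ⟨h.2.1, h.2.2⟩), if_neg (fun h => hfalse ⟨h.2.1, h.2.2⟩)]
        · simp only [List.mem_cons]
          split_ifs <;> first | rfl | tauto

-- the outer loop of A over k empty sublists, dict valued max(count - i, 0)
lemma outerA (col : List String) : ∀ (k : ℕ) (i : ℕ) (acc : List (List String)) (d : PySem.Dict String Int),
    (∀ x, d.getD x 0 = if (col.count x : Int) ≤ (i : Int) then 0 else (col.count x : Int) - (i : Int)) →
    ((List.replicate k ([] : List String)).foldl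
      (fun (st : List (List String) × PySem.Dict String Int) s =>
        let p := col.foldl
          (fun (p : List String × PySem.Dict String Int) c =>
            if 1 ≤ p.2.getD c 0 ∧ c ∉ p.1 then
              (p.1 ++ [c], p.2.insert c (p.2.getD c 0 - 1))
            else p)
          (s, st.2)
        (st.1 ++ [p.1], p.2))
      (acc, d)).1
      = acc ++ (List.range k).map (fun (j : ℕ) => (nf [] col).filter (fun c => decide (((i : Int) + (j : Int)) < (col.count c : Int)))) := by
  intro k
  induction k with
  | zero => intro i acc d hd; simp
  | succ k ih =>
    intro i acc d hd
    set g : String → Int := fun x => if (col.count x : Int) ≤ (i : Int) then 0 else (col.count x : Int) - (i : Int) with hgdef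
    have hgnn : ∀ x, 0 ≤ g x := by
      intro x
      simp only [hgdef]
      split_ifs <;> [omega; skip]
      have : 0 ≤ (col.count x : Int) := by positivity
      omega
    obtain ⟨h1, h2⟩ := innerA col g [] d hd hgnn
    simp only [List.replicate_succ, List.foldl_cons]
    rw [ih (i + 1) _ _ ?hd']
    case hd' =>
      intro x
      rw [h2 x]
      simp only [hgdef]
      by_cases hxl : x ∈ col
      · have hpos : 1 ≤ (col.count x : Int) := by exact_mod_cast List.count_pos_iff.mpr hxl
        by_cases hle : (col.count x : Int) ≤ (i : Int)
        · rw [if_pos hle]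
          rw [if_neg (by rintro ⟨_, _, h⟩; omega)]
          rw [if_pos (by push_cast; omega)]
        · rw [if_neg hle]
          rw [if_pos ⟨hxl, by simp, by omega⟩]
          by_cases hle1 : (col.count x : Int) ≤ ((i + 1 : ℕ) : Int)
          · rw [if_pos hle1]; push_cast at *; omega
          · rw [if_neg hle1]; push_cast at *; omega
      · have hz : (col.count x : Int) = 0 := by exact_mod_cast List.count_eq_zero.mpr hxl
        have hle : (col.count x : Int) ≤ (i : Int) := by omega
        have hle1 : (col.count x : Int) ≤ ((i + 1 : ℕ) : Int) := by push_cast; omega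
        rw [if_pos hle, if_pos hle1]
        rw [if_neg (by rintro ⟨h, _, _⟩; exact hxl h)]
    · rw [List.range_succ_eq_map, List.map_cons, List.map_map, List.append_assoc,
        List.singleton_append]
      congr 1
      congr 1
      · rw [h1, List.nil_append]
        apply List.filter_congr
        intro x hx
        simp only [hgdef, decide_eq_decide]
        push_cast
        split_ifs <;> omega
      · apply List.map_congr_left
        intro j hj
        apply List.filter_congr
        intro x hx
        simp only [decide_eq_decide]
        push_cast
        omega

-- B's single pass computes (Counter(collection), its keys in first-appearance order)
lemma bPair : ∀ (l : List String) (d : PySem.Dict String Int) (o : List String),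
    o = d.keys →
    l.foldl
      (fun (st : PySem.Dict String Int × List String) c =>
        if st.1.contains c then
          (st.1.insert c (st.1.getD c 0 + 1), st.2)
        else
          (st.1.insert c 1, st.2 ++ [c]))
      (d, o)
    = (l.foldl (fun d x => d.insert x (d.getD x 0 + 1)) d,
       (l.foldl (fun d x => d.insert x (d.getD x 0 + 1)) d).keys) := by
  intro l
  induction l with
  | nil => intro d o h; simp [h]
  | cons c l ih =>
    intro d o h
    simp only [List.foldl_cons]
    cases hc : d.contains c with
    | true =>
      rw [if_pos rfl]
      exact ih _ _ (by rw [h, PySem.Dict.keys_insert_of_contains d _ hc])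
    | false =>
      rw [if_neg (by simp)]
      have h1 : d.insert c 1 = d.insert c (d.getD c 0 + 1) := by
        rw [PySem.Dict.getD_of_not_contains d 0 hc]; norm_num
      rw [h1]
      exact ih _ _ (by rw [h, PySem.Dict.keys_insert_of_not_contains d _ hc])

lemma values_counter_nonempty {col : List String} (h : col ≠ []) :
    PySem.List.max? (PySem.Dict.counter col).values (fun v => v) ≠ none := by
  intro hm
  rw [PySem.List.max?_eq_none_iff] at hm
  cases col with
  | nil => exact h rfl
  | cons c t =>
    have hitems : (PySem.Dict.counter (c :: t)).items = [] := by
      have := hm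
      simp only [PySem.Dict.values] at this
      exact List.map_eq_nil_iff.mp this
    have hkeys : (PySem.Dict.counter (c :: t)).keys = [] := by
      simp [PySem.Dict.keys, hitems]
    rw [PySem.Dict.keys_counter] at hkeys
    have : c ∈ PySem.Set.ofList (c :: t) := (PySem.Set.mem_ofList _ _).mpr (by simp)
    rw [hkeys] at this
    simp at this

lemma ofList_eq_nf (l : List String) : PySem.Set.ofList l = nf [] l := by
  have := foldl_set_add_eq_nf l []
  simpa [PySem.Set.ofList, PySem.Set.empty] using this

theorem organize_exhibition_spec : Claim_equal_organize_exhibition := by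
  intro col _ hpre
  unfold Pre_organize_exhibition at hpre
  unfold Spec_organize_exhibition
  simp only [organize_exhibition, organize_exhibition_alt]
  rw [bPair col PySem.Dict.empty [] (by simp)]
  rw [PySem.Dict.foldl_insert_getD_add_one_eq_counter]
  cases hm : PySem.List.max? (PySem.Dict.counter col).values (fun v => v) with
  | none => exact absurd hm (values_counter_nonempty hpre)
  | some m =>
    dsimp only
    have hcount : ∀ c, (PySem.Dict.counter col).getD c 0 = (col.count c : Int) :=
      PySem.Dict.getD_counter col
    have hkeysnf : (PySem.Dict.counter col).keys = nf [] col := by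
      rw [PySem.Dict.keys_counter, ofList_eq_nf]
    by_cases h1 : m = 1
    · subst h1
      rw [if_pos rfl]
      have hr1 : PySem.List.pyRange 0 1 1 = [0] := by decide
      rw [hr1]
      simp only [List.map_cons, List.map_nil]
      have hnodup : col.Nodup := by
        rw [List.nodup_iff_count_le_one]
        intro a
        by_cases ha : a ∈ col
        · have hmem : ((col.count a : Int)) ∈ (PySem.Dict.counter col).values := by
            rw [PySem.Dict.values_eq_map_keys _ (PySem.Dict.nodup_keys_counter col) 0]
            exact List.mem_map.mpr ⟨a, by
              rw [PySem.Dict.keys_counter]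
              exact (PySem.Set.mem_ofList _ _).mpr ha, hcount a⟩
          have := PySem.List.max?_isMax hm _ hmem
          exact_mod_cast this
        · simp [List.count_eq_zero.mpr ha]
      have hnf : nf [] col = col := nf_eq_self_of_nodup col [] hnodup (by simp)
      have hfil : (PySem.Dict.counter col).keys.filter
          (fun c => decide ((0 : Int) < (PySem.Dict.counter col).getD c 0)) = col := by
        rw [hkeysnf, hnf]
        rw [List.filter_eq_self]
        intro a ha
        rw [hcount a]
        simp only [decide_eq_true_eq]
        exact_mod_cast List.count_pos_iff.mpr ha
      rw [hfil]
    · rw [if_neg h1]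
      have hrep : (PySem.List.pyRange 0 m 1).map (fun _ => ([] : List String))
          = List.replicate (m.toNat) ([] : List String) := by
        rw [PySem.List.pyRange_one, List.map_map]
        simp only [Function.comp_def]
        rw [List.map_const']
        simp
      rw [hrep]
      rw [outerA col m.toNat 0 [] _ (by
        intro x
        rw [hcount x]
        have : 0 ≤ (col.count x : Int) := by positivity
        push_cast
        split_ifs <;> omega)]
      rw [PySem.List.pyRange_one]
      simp only [List.map_map, List.nil_append, sub_zero]
      apply List.map_congr_left
      intro j hj
      rw [hkeysnf]
      apply List.filter_congr
      intro x hx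
      rw [hcount x]
      simp only [decide_eq_decide]
      push_cast
      omega
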